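-- pv_equiv track=rewrite | github.com/cmes31419/ICDLAB_Final_Project | CVSD_final_team011/Python/gen_rotate_k.py | mult_matrix_for_const
-- ===== SOURCE A (Python) =====
-- def gf_mul(a: int, b: int, q: int, prim_poly: int) -> int:
--     """Multiply a and b in GF(2^q) with given primitive polynomial."""
--     res = 0
--     for _ in range(2 * q):
--         if b & 1:
--             res ^= a
--         b >>= 1
--         if not b:
--             break
--         a <<= 1
--         if a & (1 << q):
--             a ^= prim_poly
--     return res & ((1 << q) - 1)
--
-- def mult_matrix_for_const(c: int, q: int, prim_poly: int):
--     """
--     Return q×q matrix M such that y = c * x in GF(2^q)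
--     corresponds to y_bits = M * x_bits (over GF(2)).
--     M[row][col] = 1 if output_bit[row] depends on input_bit[col].
--     """
--     M = [[0] * q for _ in range(q)]
--     for k in range(q):
--         out_elem = gf_mul(c, 1 << k, q, prim_poly)
--         for r in range(q):
--             if (out_elem >> r) & 1:
--                 M[r][k] = 1
--     return M
-- ===== SOURCE B (Python) =====
-- def mult_matrix_for_const(c, q, prim_poly):
--     # One pass of multiply-by-x steps: vals[k] = c * x^k in GF(2^q),
--     # then read the matrix off as bits of those field elements.
--     vals = []
--     cur = c
--     for _ in range(q):
--         vals.append(cur)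
--         cur <<= 1
--         if cur & (1 << q):
--             cur ^= prim_poly
--     return [[(v >> r) & 1 for v in vals] for r in range(q)]
-- ===== Notes on version B (the rewrite author's own statement) =====
-- stated objective: alternative
-- what changed: Instead of calling gf_mul(c, 1<<k, ...) separately for each column (each a loop of up to 2q iterations), B threads one running field element through a single chain of multiply-by-x steps and reads each column's bits off it, emitting the matrix as a comprehension instead of in-place 1-writes into a zero matrix.
import Mathlib
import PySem

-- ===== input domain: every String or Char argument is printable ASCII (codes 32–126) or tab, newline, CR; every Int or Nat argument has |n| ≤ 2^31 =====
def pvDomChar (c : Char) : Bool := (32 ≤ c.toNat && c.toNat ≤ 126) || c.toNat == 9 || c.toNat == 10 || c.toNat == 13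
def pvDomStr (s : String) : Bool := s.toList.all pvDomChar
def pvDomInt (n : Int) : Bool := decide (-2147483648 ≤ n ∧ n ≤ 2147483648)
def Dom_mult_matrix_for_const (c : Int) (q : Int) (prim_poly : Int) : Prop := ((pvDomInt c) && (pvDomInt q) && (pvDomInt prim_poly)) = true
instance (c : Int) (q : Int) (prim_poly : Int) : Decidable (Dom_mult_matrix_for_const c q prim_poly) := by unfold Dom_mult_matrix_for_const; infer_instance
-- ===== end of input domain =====

-- ===== PORT A =====
-- B changes the decomposition: one running multiply-by-x element threaded across the columns instead of q separate gf_mul calls (objective: alternative).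
-- Shared transliteration of the two identical Python lines "v <<= 1; if v & (1 << q): v ^= prim_poly"
-- (appearing verbatim in both Source A's gf_mul and Source B's loop); shift amounts use q.toNat — exact, since
-- every executed Python shift here has q ≥ 1.
def xstep (q prim v : Int) : Int :=
  let v := v <<< (1 : Nat)
  if PySem.Int.band v ((1 : Int) <<< q.toNat) ≠ 0 then PySem.Int.bxor v prim else v

-- the for-loop of gf_mul, fuel = number of remaining iterations of range(2*q); early `break` returns res
def gfMulLoop (q prim : Int) : Nat → Int → Int → Int → Int
  | 0, res, _, _ => res
  | fuel + 1, res, a, b =>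
    let res := if PySem.Int.band b 1 ≠ 0 then PySem.Int.bxor res a else res
    let b := b >>> (1 : Nat)
    if b = 0 then res
    else gfMulLoop q prim fuel res (xstep q prim a) b

def gf_mul (a b q prim_poly : Int) : Int :=
  PySem.Int.band (gfMulLoop q prim_poly (2 * q).toNat 0 a b) (((1 : Int) <<< q.toNat) - 1)

def mult_matrix_for_const (c : Int) (q : Int) (prim_poly : Int) : List (List Int) :=
  let M := (List.range q.toNat).map (fun _ => List.replicate q.toNat (0 : Int))
  (List.range q.toNat).foldl (fun M (k : Nat) =>
    let out_elem := gf_mul c ((1 : Int) <<< k) q prim_poly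
    (List.range q.toNat).foldl (fun M (r : Nat) =>
      if PySem.Int.band (out_elem >>> r) 1 ≠ 0 then M.set r ((M.getD r []).set k 1) else M) M) M

-- ===== PORT B =====
-- the for-loop of Source B: collect the running field element `cur` for each column
def altVals (q prim : Int) : Nat → Int → List Int
  | 0, _ => []
  | n + 1, cur => cur :: altVals q prim n (xstep q prim cur)

def mult_matrix_for_const_alt (c : Int) (q : Int) (prim_poly : Int) : List (List Int) :=
  let vals := altVals q prim_poly q.toNat c
  (List.range q.toNat).map (fun r => vals.map (fun v => PySem.Int.band (v >>> r) 1))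

-- ===== PRECONDITION & SPEC =====
def Spec_mult_matrix_for_const (c : Int) (q : Int) (prim_poly : Int) (out : List (List Int)) : Prop := out = mult_matrix_for_const_alt c q prim_poly
instance (c : Int) (q : Int) (prim_poly : Int) (out : List (List Int)) : Decidable (Spec_mult_matrix_for_const c q prim_poly out) := by unfold Spec_mult_matrix_for_const; infer_instance

-- ===== CLAIM (what is proved, stated in full; the proofs are below) =====
def Claim_equal_mult_matrix_for_const : Prop := ∀ (c : Int) (q : Int) (prim_poly : Int), Dom_mult_matrix_for_const c q prim_poly → Spec_mult_matrix_for_const c q prim_poly (mult_matrix_for_const c q prim_poly)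

-- ===== LEMMAS AND PROOFS =====

-- matrix-as-function view used to relate the two ports
def matF (n : Nat) (g : Nat → Nat → Int) : List (List Int) :=
  (List.range n).map (fun r => (List.range n).map (fun k => g r k))

theorem matF_congr {n : Nat} {g₁ g₂ : Nat → Nat → Int}
    (h : ∀ r < n, ∀ k < n, g₁ r k = g₂ r k) : matF n g₁ = matF n g₂ := by
  simp only [matF]
  refine List.map_congr_left (fun r hr => ?_)
  exact List.map_congr_left (fun k hk => h r (List.mem_range.mp hr) k (List.mem_range.mp hk))

theorem band_one_mem (v : Int) : PySem.Int.band v 1 = 0 ∨ PySem.Int.band v 1 = 1 := by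
  rw [PySem.Int.band_one]
  have h1 := PySem.Int.mod_nonneg v (b := 2) (by norm_num)
  have h2 := PySem.Int.mod_lt v (b := 2) (by norm_num)
  omega

theorem band_mask_eq_emod (x : Int) (n : Nat) :
    PySem.Int.band x ((2 : Int) ^ n - 1) = x % (2 : Int) ^ n := by
  have hm : ((2:Int)^n - 1) = ((2^n - 1 : Nat) : Int) := by
    have := Nat.one_le_two_pow (n := n); push_cast [this]; ring
  by_cases hx : 0 ≤ x
  · rw [show x = ((x.toNat : Int)) from (Int.toNat_of_nonneg hx).symm, hm,
      PySem.Int.band_natCast, Nat.and_two_pow_sub_one_eq_mod]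
    push_cast; ring
  · have ha : x = -(((-x-1).toNat : Int) + 1) := by omega
    set a := (-x-1).toNat with hadef
    have hb : PySem.Int.band x ((2:Int)^n - 1) = ((2^n - 1 - a % 2^n : Nat) : Int) := by
      rw [hm]
      show PySem.Int.band x ((((2^n-1 : Nat)) : Int)) = _
      unfold PySem.Int.band
      rw [if_neg (by omega), if_pos (by positivity)]
      congr 1
      rw [Int.toNat_natCast, Nat.land_comm, Nat.and_two_pow_sub_one_eq_mod]
    rw [hb]
    set P := (2:Int)^n with hP
    have h1 := Int.ediv_add_emod ((a:Int)) P
    have hmod : ((a % 2^n : Nat) : Int) = (a:Int) % P := by push_cast; ring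
    have hlt : (a:Int) % P < P := Int.emod_lt_of_pos _ (by positivity)
    have hge : 0 ≤ (a:Int) % P := Int.emod_nonneg _ (by positivity)
    have hcast : ((2^n - 1 - a % 2^n : Nat) : Int) = P - 1 - (a:Int) % P := by
      have hle : a % 2^n ≤ 2^n - 1 := by
        have := Nat.mod_lt a (y := 2^n) (by positivity); omega
      push_cast [hle, Nat.one_le_two_pow]
      rw [hP]
    rw [hcast]
    have hxeq : x = (P - 1 - (a:Int) % P) + (-( (a:Int)/P) - 1) * P := by
      linear_combination ha + h1
    rw [hxeq, Int.add_mul_emod_self_right]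
    exact (Int.emod_eq_of_lt (by omega) (by omega)).symm

theorem bit_of_emod (x : Int) (n r : Nat) (hr : r < n) :
    PySem.Int.band ((x % (2 : Int) ^ n) >>> r) 1 = PySem.Int.band (x >>> r) 1 := by
  rw [PySem.Int.band_one, PySem.Int.band_one,
      PySem.Int.mod_eq_emod_of_pos (by norm_num : (0:Int) < 2), PySem.Int.mod_eq_emod_of_pos (by norm_num : (0:Int) < 2),
      Int.shiftRight_eq_div_pow, Int.shiftRight_eq_div_pow]
  set P := (2:Int)^n with hP
  set R := ((2^r : Nat) : Int) with hR
  have hPR : P = ((2:Int)^(n-r-1) * 2) * R := by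
    rw [hP, hR]; push_cast
    rw [← pow_succ, ← pow_add]; congr 1; omega
  have h1 := Int.ediv_add_emod x P
  have hxeq : x = x % P + ((x / P) * ((2:Int)^(n-r-1) * 2)) * R := by
    linear_combination -h1 + (x/P) * hPR
  conv_rhs => rw [hxeq]
  rw [Int.add_mul_ediv_right _ _ (by rw [hR]; positivity)]
  rw [show x % P / R + x / P * (2^(n-r-1)*2) = x % P / R + (x / P * 2^(n-r-1))*2 by ring]
  rw [Int.add_mul_emod_self_right]

theorem gfMulLoop_pow (q prim : Int) (k : Nat) :
    ∀ (fuel : Nat) (a : Int), k < fuel →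
      gfMulLoop q prim fuel 0 a ((2 : Int) ^ k) = (xstep q prim)^[k] a := by
  induction k with
  | zero =>
    intro fuel a hf
    obtain ⟨f, rfl⟩ : ∃ f, fuel = f + 1 := ⟨fuel - 1, by omega⟩
    rw [pow_zero]
    simp only [gfMulLoop, (by decide : ((1:Int) >>> (1:Nat)) = 0), if_pos rfl,
      Function.iterate_zero_apply, if_pos (by decide : PySem.Int.band 1 1 ≠ 0)]
    rw [PySem.Int.bxor_comm]
    exact PySem.Int.bxor_zero a
  | succ k ih =>
    intro fuel a hf
    obtain ⟨f, rfl⟩ : ∃ f, fuel = f + 1 := ⟨fuel - 1, by omega⟩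
    have hb : ¬ PySem.Int.band ((2:Int)^(k+1)) 1 ≠ 0 := by
      rw [PySem.Int.band_one]
      simp only [ne_eq, not_not]
      rw [PySem.Int.mod_eq_zero_iff_dvd]
      exact Dvd.intro (2^k) (by ring)
    have hs : ((2:Int)^(k+1)) >>> (1:Nat) = 2^k := by
      rw [Int.shiftRight_eq_div_pow, pow_one, pow_succ]
      exact Int.mul_ediv_cancel _ two_ne_zero
    have hnz : ((2:Int)^k) ≠ 0 := by positivity
    simp only [gfMulLoop, if_neg hb, hs, if_neg hnz]
    rw [ih f (xstep q prim a) (by omega), ← Function.iterate_succ_apply]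

theorem gf_mul_eq (c q prim : Int) (k : Nat) (hk : k < (2 * q).toNat) :
    gf_mul c ((1 : Int) <<< k) q prim = ((xstep q prim)^[k] c) % (2 : Int) ^ q.toNat := by
  rw [gf_mul, Int.shiftLeft_eq, Int.shiftLeft_eq, one_mul, one_mul,
    gfMulLoop_pow q prim k _ _ hk, band_mask_eq_emod]

theorem altVals_eq (q prim : Int) (n : Nat) :
    ∀ cur, altVals q prim n cur = (List.range n).map (fun k => (xstep q prim)^[k] cur) := by
  induction n with
  | zero => intro cur; simp [altVals]
  | succ n ih =>
    intro cur
    rw [altVals, ih, List.range_succ_eq_map]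
    simp [List.map_map, Function.comp_def, Function.iterate_succ_apply]

theorem alt_eq_matF (c q prim : Int) :
    mult_matrix_for_const_alt c q prim
      = matF q.toNat (fun r k => PySem.Int.band (((xstep q prim)^[k] c) >>> r) 1) := by
  show (List.range q.toNat).map
      (fun r => (altVals q prim q.toNat c).map (fun v => PySem.Int.band (v >>> r) 1)) = _
  rw [altVals_eq]
  simp only [matF, List.map_map]
  rfl

theorem set_matF (n r k : Nat) (hr : r < n) (hk : k < n) (g : Nat → Nat → Int) :
    (matF n g).set r (((matF n g).getD r []).set k 1)
      = matF n (fun r' k' => if r' = r ∧ k' = k then 1 else g r' k') := by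
  have hget : (matF n g).getD r [] = (List.range n).map (fun k' => g r k') := by
    rw [List.getD_eq_getElem _ _ (by simp [matF, hr])]
    simp [matF]
  rw [hget]
  apply List.ext_getElem (by simp [matF])
  intro i hi1 hi2
  have hin : i < n := by simpa [matF] using hi2
  rw [List.getElem_set]
  simp only [matF, List.getElem_map, List.getElem_range]
  split_ifs with hir
  · subst hir
    apply List.ext_getElem (by simp)
    intro j hj1 hj2
    have hjn : j < n := by simpa using hj2
    rw [List.getElem_set]
    simp only [List.getElem_map, List.getElem_range]
    by_cases hjk : k = j
    · simp [hjk]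
    · simp [hjk]
      intro h
      exact absurd h.symm hjk
  · apply List.ext_getElem (by simp)
    intro j hj1 hj2
    simp only [List.getElem_map, List.getElem_range]
    have : ¬ (i = r) := fun h => hir h.symm
    simp [this]

theorem inner_fold_eq (n k : Nat) (hk : k < n) (out : Int) (g : Nat → Nat → Int) :
    ∀ m, m ≤ n →
      (List.range m).foldl (fun M (r : Nat) =>
          if PySem.Int.band (out >>> r) 1 ≠ 0 then M.set r ((M.getD r []).set k 1) else M)
        (matF n g)
      = matF n (fun r' k' =>
          if r' < m ∧ k' = k ∧ PySem.Int.band (out >>> r') 1 ≠ 0 then 1 else g r' k') := by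
  intro m
  induction m with
  | zero =>
    intro _
    simp only [List.range_zero, List.foldl_nil]
    exact matF_congr (by intro r hr k' hk'; simp)
  | succ m ih =>
    intro hm
    rw [List.range_succ, List.foldl_append, ih (by omega), List.foldl_cons, List.foldl_nil]
    by_cases hc : PySem.Int.band (out >>> m) 1 ≠ 0
    · rw [if_pos hc, set_matF n m k (by omega) hk]
      apply matF_congr
      intro r' hr' k' hk'
      by_cases h1 : r' = m <;> by_cases h2 : k' = k <;>
        simp [h1, h2, hc] <;> omega
    · rw [if_neg hc]
      apply matF_congr
      intro r' hr' k' hk'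
      by_cases h1 : r' = m <;> by_cases h2 : k' = k <;>
        simp [h1, h2, hc] <;> omega

theorem init_matF (n : Nat) :
    (List.range n).map (fun _ => List.replicate n (0 : Int)) = matF n (fun _ _ => 0) := by
  simp [matF, List.map_const', List.length_range]

theorem outer_fold_eq (n : Nat) (out : Nat → Int) :
    ∀ m, m ≤ n →
      (List.range m).foldl (fun M (k : Nat) =>
          (List.range n).foldl (fun M (r : Nat) =>
            if PySem.Int.band (out k >>> r) 1 ≠ 0 then M.set r ((M.getD r []).set k 1) else M) M)
        (matF n (fun _ _ => 0))
      = matF n (fun r k => if k < m ∧ PySem.Int.band (out k >>> r) 1 ≠ 0 then 1 else 0) := by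
  intro m
  induction m with
  | zero =>
    intro _
    simp only [List.range_zero, List.foldl_nil]
    exact matF_congr (by intro r hr k' hk'; simp)
  | succ m ih =>
    intro hm
    rw [List.range_succ, List.foldl_append, ih (by omega), List.foldl_cons, List.foldl_nil,
      inner_fold_eq n m (by omega) (out m) _ n (le_refl n)]
    apply matF_congr
    intro r' hr' k' hk'
    by_cases h2 : k' = m <;>
      simp [h2, hr'] <;> omega

theorem a_eq_matF (c q prim : Int) :
    mult_matrix_for_const c q prim
      = matF q.toNat (fun r k =>
          if k < q.toNat ∧ PySem.Int.band (gf_mul c ((1 : Int) <<< k) q prim >>> r) 1 ≠ 0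
          then 1 else 0) := by
  show (List.range q.toNat).foldl _ ((List.range q.toNat).map (fun _ => List.replicate q.toNat (0:Int))) = _
  rw [init_matF]
  exact outer_fold_eq q.toNat (fun k => gf_mul c ((1:Int) <<< k) q prim) q.toNat (le_refl _)

-- ===== VERDICT (by name: the statement is the Claim_ definition above) =====
theorem mult_matrix_for_const_spec : Claim_equal_mult_matrix_for_const := by
  intro c q prim _
  unfold Spec_mult_matrix_for_const
  rw [a_eq_matF, alt_eq_matF]
  apply matF_congr
  intro r hr k hk
  have hk2 : k < (2 * q).toNat := by omega
  rw [gf_mul_eq c q prim k hk2, bit_of_emod _ _ _ hr]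
  rcases band_one_mem (((xstep q prim)^[k] c) >>> r) with h | h <;> simp [h, hk]
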